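-- pv_equiv track=rewrite | github.com/Sand004/enterprise-rag-system | src/ingestion/chunking.py | _get_overlap_sentences
-- ===== SOURCE A (Python) =====
-- from typing import Dict, List, Optional, Tuple
--
-- def _get_overlap_sentences(
--
--     sentences: List[str],
--     target_overlap: int
-- ) -> List[str]:
--     """Get sentences for chunk overlap"""
--     overlap_sentences = []
--     overlap_length = 0
--
--     for sent in reversed(sentences):
--         overlap_length += len(sent)
--         overlap_sentences.insert(0, sent)
--
--         if overlap_length >= target_overlap:
--             break
--
--     return overlap_sentences
-- ===== SOURCE B (Python) =====
-- def _get_overlap_sentences(sentences, target_overlap):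
--     """Get sentences for chunk overlap (cumulative table + binary search)."""
--     if not sentences:
--         return []
--     # cumulative lengths of the last 1, 2, ... sentences (non-decreasing)
--     cum = []
--     total = 0
--     for s in reversed(sentences):
--         total += len(s)
--         cum.append(total)
--     # bisect_left: first index whose cumulative length reaches target_overlap
--     lo, hi = 0, len(cum)
--     while lo < hi:
--         mid = (lo + hi) // 2
--         if cum[mid] < target_overlap:
--             lo = mid + 1
--         else:
--             hi = mid
--     k = lo + 1 if lo < len(cum) else len(cum)
--     return sentences[len(sentences) - k:]
-- ===== Notes on version B (the rewrite author's own statement) =====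
-- stated objective: faster
-- what changed: Replaces A's reversed loop that repeatedly insert(0)s into the result (quadratic in the number of kept sentences) by building a cumulative-length table, binary-searching (hand-written bisect_left) for the first index reaching the target, and slicing the tail off the original list.
import Mathlib
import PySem

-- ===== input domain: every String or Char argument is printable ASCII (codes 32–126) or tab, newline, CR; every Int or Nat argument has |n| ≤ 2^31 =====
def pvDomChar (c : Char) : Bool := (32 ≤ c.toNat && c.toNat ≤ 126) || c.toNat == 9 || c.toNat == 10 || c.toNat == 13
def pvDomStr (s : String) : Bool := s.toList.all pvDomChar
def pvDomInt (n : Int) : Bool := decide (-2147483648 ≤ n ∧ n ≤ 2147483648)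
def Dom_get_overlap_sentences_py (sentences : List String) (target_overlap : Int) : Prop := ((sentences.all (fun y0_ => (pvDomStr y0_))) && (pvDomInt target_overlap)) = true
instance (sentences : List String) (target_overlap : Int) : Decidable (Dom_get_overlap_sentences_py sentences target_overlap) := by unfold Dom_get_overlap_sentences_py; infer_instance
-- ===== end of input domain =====

-- B replaces A's early-break reverse scan by a cumulative-length table plus a binary search (alternative decomposition; return value only).


-- ===== PORT A =====
-- the loop 'for sent in reversed(sentences): …' with early break; insert(0, sent) is a cons onto the accumulator
def goA (target : Int) : List String → Int → List String → List String
  | [], _, acc => acc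
  | s :: rest, ol, acc =>
    let ol' := ol + PySem.Str.len s
    let acc' := s :: acc
    if target ≤ ol' then acc' else goA target rest ol' acc'

def get_overlap_sentences_py (sentences : List String) (target_overlap : Int) : List String :=
  goA target_overlap sentences.reverse 0 []

-- ===== PORT B =====
-- the cum-building loop of Source B (total += len(s); cum.append(total)), produced front-to-back
def cumRev : List String → Int → List Int
  | [], _ => []
  | s :: rest, total =>
    let t' := total + PySem.Str.len s
    t' :: cumRev rest t'

-- Source B's hand-written bisect_left while-loop; cum[mid] is always in range (lo ≤ mid < hi ≤ len), so getD is exact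
def bisectB (cum : List Int) (target : Int) (lo hi : Nat) : Nat :=
  if h : lo < hi then
    let mid := (lo + hi) / 2
    if cum.getD mid 0 < target then bisectB cum target (mid + 1) hi
    else bisectB cum target lo mid
  else lo
termination_by hi - lo
decreasing_by all_goals omega

def get_overlap_sentences_py_alt (sentences : List String) (target_overlap : Int) : List String :=
  if sentences.isEmpty then []
  else
    let cum := cumRev sentences.reverse 0
    let idx := bisectB cum target_overlap 0 cum.length
    let k := if idx < cum.length then idx + 1 else cum.length
    -- sentences[len(sentences)-k:] with 0 ≤ len-k ≤ len: exact as drop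
    sentences.drop (sentences.length - k)

-- ===== PRECONDITION & SPEC =====
def Spec_get_overlap_sentences_py (sentences : List String) (target_overlap : Int) (out : List String) : Prop := out = get_overlap_sentences_py_alt sentences target_overlap
instance (sentences : List String) (target_overlap : Int) (out : List String) : Decidable (Spec_get_overlap_sentences_py sentences target_overlap out) := by unfold Spec_get_overlap_sentences_py; infer_instance

-- ===== CLAIM (what is proved, stated in full; the proofs are below) =====
def Claim_equal_get_overlap_sentences_py : Prop := ∀ (sentences : List String) (target_overlap : Int), Dom_get_overlap_sentences_py sentences target_overlap → Spec_get_overlap_sentences_py sentences target_overlap (get_overlap_sentences_py sentences target_overlap)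

-- ===== LEMMAS AND PROOFS =====

-- number of trailing sentences A keeps, as a function of the reversed list and the remaining target
def Kfun : List String → Int → Nat
  | [], _ => 0
  | s :: rest, u => if u ≤ PySem.Str.len s then 1 else 1 + Kfun rest (u - PySem.Str.len s)

-- number of cumulative sums strictly below the target (what bisect_left computes)
def Jfun : List String → Int → Nat
  | [], _ => 0
  | s :: rest, u => if PySem.Str.len s < u then 1 + Jfun rest (u - PySem.Str.len s) else 0

theorem str_len_nonneg (s : String) : 0 ≤ PySem.Str.len s := by
  simp [PySem.Str.len_eq]

theorem goA_eq_take (target : Int) (r : List String) :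
    ∀ ol acc, goA target r ol acc = (r.take (Kfun r (target - ol))).reverse ++ acc := by
  induction r with
  | nil => intro ol acc; simp [goA, Kfun]
  | cons s rest ih =>
    intro ol acc
    simp only [goA, Kfun, PySem.Str.len_eq]
    by_cases h : target ≤ ol + (s.toList.length : Int)
    · rw [if_pos h, if_pos (show target - ol ≤ (s.toList.length : Int) by omega)]
      simp
    · rw [if_neg h, if_neg (show ¬ target - ol ≤ (s.toList.length : Int) by omega), ih]
      have h2 : target - (ol + (s.toList.length : Int)) = target - ol - (s.toList.length : Int) := by ring
      rw [h2, Nat.add_comm 1 (Kfun rest (target - ol - (s.toList.length : Int))), List.take_succ_cons]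
      simp

theorem K_eq_min (r : List String) : ∀ u, Kfun r u = min (Jfun r u + 1) r.length := by
  induction r with
  | nil => intro u; simp [Kfun, Jfun]
  | cons s rest ih =>
    intro u
    simp only [Kfun, Jfun, List.length_cons, PySem.Str.len_eq]
    by_cases h : u ≤ (s.toList.length : Int)
    · rw [if_pos h, if_neg (show ¬ (s.toList.length : Int) < u by omega)]
      omega
    · rw [if_neg h, if_pos (show (s.toList.length : Int) < u by omega), ih]
      omega

theorem Kfun_le_length (r : List String) (u : Int) : Kfun r u ≤ r.length := by
  rw [K_eq_min]; omega

theorem cumRev_length (r : List String) : ∀ total, (cumRev r total).length = r.length := by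
  induction r with
  | nil => intro total; simp [cumRev]
  | cons s rest ih => intro total; simp [cumRev, ih]

theorem cumRev_lb (r : List String) : ∀ total x, x ∈ cumRev r total → total ≤ x := by
  induction r with
  | nil => intro total x hx; simp [cumRev] at hx
  | cons s rest ih =>
    intro total x hx
    simp only [cumRev, List.mem_cons] at hx
    have hs := str_len_nonneg s
    rcases hx with h | h
    · omega
    · have := ih (total + PySem.Str.len s) x h; omega

theorem cumRev_mono (r : List String) :
    ∀ total i j, i ≤ j → j < (cumRev r total).length →
      (cumRev r total).getD i 0 ≤ (cumRev r total).getD j 0 := by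
  induction r with
  | nil => intro total i j _ hj; simp [cumRev] at hj
  | cons s rest ih =>
    intro total i j hij hj
    simp only [cumRev, List.length_cons] at hj ⊢
    cases i with
    | zero =>
      cases j with
      | zero => simp
      | succ j =>
        have hj' : j < (cumRev rest (total + PySem.Str.len s)).length := by
          simpa using hj
        have hmem : (cumRev rest (total + PySem.Str.len s)).getD j 0 ∈
            cumRev rest (total + PySem.Str.len s) := by
          rw [List.getD_eq_getElem _ _ hj']
          exact List.getElem_mem hj'
        have := cumRev_lb rest (total + PySem.Str.len s) _ hmem
        simpa using this
    | succ i =>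
      cases j with
      | zero => omega
      | succ j =>
        have hj' : j < (cumRev rest (total + PySem.Str.len s)).length := by
          simpa using hj
        have := ih (total + PySem.Str.len s) i j (by omega) hj'
        simpa using this

-- characterization of a bisect_left result
def Pidx (c : List Int) (t : Int) (idx : Nat) : Prop :=
  idx ≤ c.length ∧ (∀ i, i < idx → c.getD i 0 < t) ∧ (idx < c.length → ¬ c.getD idx 0 < t)

theorem Pidx_unique (c : List Int) (t : Int) (i j : Nat) (hi : Pidx c t i) (hj : Pidx c t j) : i = j := by
  rcases lt_trichotomy i j with h | h | h
  · exact absurd (hj.2.1 i h) (hi.2.2 (lt_of_lt_of_le h hj.1))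
  · exact h
  · exact absurd (hi.2.1 j h) (hj.2.2 (lt_of_lt_of_le h hi.1))

theorem bisect_Pidx (c : List Int) (t : Int)
    (mono : ∀ i j, i ≤ j → j < c.length → c.getD i 0 ≤ c.getD j 0) :
    ∀ n lo hi, hi - lo = n → lo ≤ hi → hi ≤ c.length →
      (∀ i, i < lo → c.getD i 0 < t) →
      (∀ i, hi ≤ i → i < c.length → ¬ c.getD i 0 < t) →
      Pidx c t (bisectB c t lo hi) := by
  intro n
  induction n using Nat.strong_induction_on with
  | _ n IH =>
    intro lo hi hn hlh hhl hbelow habove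
    rw [bisectB]
    by_cases h : lo < hi
    · simp only [h, dif_pos]
      set mid := (lo + hi) / 2 with hmid
      have hm1 : lo ≤ mid := by omega
      have hm2 : mid < hi := by omega
      by_cases hc : c.getD mid 0 < t
      · simp only [hc, if_pos]
        refine IH (hi - (mid + 1)) (by omega) (mid + 1) hi rfl (by omega) hhl ?_ habove
        intro i hi'
        have : c.getD i 0 ≤ c.getD mid 0 := mono i mid (by omega) (by omega)
        omega
      · simp only [hc, if_neg, not_false_iff]
        refine IH (mid - lo) (by omega) lo mid rfl (by omega) (by omega) hbelow ?_
        intro i hi' hlen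
        have : c.getD mid 0 ≤ c.getD i 0 := mono mid i hi' hlen
        omega
    · simp only [h, dif_neg, not_false_iff]
      have : lo = hi := by omega
      exact ⟨by omega, hbelow, fun hlt => habove lo (by omega) hlt⟩

-- Jfun satisfies the bisect_left characterization on the cumulative list
theorem J_Pidx (t : Int) (r : List String) : ∀ total, Pidx (cumRev r total) t (Jfun r (t - total)) := by
  induction r with
  | nil =>
    intro total
    refine ⟨by simp [cumRev, Jfun], ?_, ?_⟩
    · intro i hi; simp [Jfun] at hi
    · intro h; simp [cumRev] at h
  | cons s rest ih =>
    intro total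
    simp only [Jfun, cumRev, PySem.Str.len_eq]
    by_cases h : (s.toList.length : Int) < t - total
    · have ih' := ih (total + (s.toList.length : Int))
      have heq : t - (total + (s.toList.length : Int)) = t - total - (s.toList.length : Int) := by ring
      rw [heq] at ih'
      rw [if_pos h, Nat.add_comm 1 (Jfun rest (t - total - (s.toList.length : Int)))]
      refine ⟨?_, ?_, ?_⟩
      · simp only [List.length_cons]
        exact Nat.succ_le_succ ih'.1
      · intro i hi
        cases i with
        | zero => simp only [List.getD_cons_zero]; omega
        | succ i =>
          rw [List.getD_cons_succ]
          exact ih'.2.1 i (by omega)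
      · intro hlt
        rw [List.getD_cons_succ]
        exact ih'.2.2 (by simpa using hlt)
    · rw [if_neg h]
      refine ⟨by simp, ?_, ?_⟩
      · intro i hi; omega
      · intro _; rw [List.getD_cons_zero]; omega

theorem take_reverse_eq_drop (l : List String) (k : Nat) (hk : k ≤ l.length) :
    (l.reverse.take k).reverse = l.drop (l.length - k) := by
  rw [List.take_reverse]
  simp

-- ===== VERDICT (by name: the statement is the Claim_ definition above) =====
theorem get_overlap_sentences_py_spec : Claim_equal_get_overlap_sentences_py := by
  intro sentences target _
  unfold Spec_get_overlap_sentences_py get_overlap_sentences_py get_overlap_sentences_py_alt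
  by_cases hemp : sentences.isEmpty
  · have : sentences = [] := List.isEmpty_iff.mp hemp
    subst this
    simp [goA]
  · simp only [hemp, if_neg, not_false_iff]
    set r := sentences.reverse with hr
    have hA : goA target r 0 [] = (r.take (Kfun r target)).reverse := by
      rw [goA_eq_take]
      simp
    have hmono := cumRev_mono r 0
    have hP := bisect_Pidx (cumRev r 0) target hmono ((cumRev r 0).length - 0) 0 (cumRev r 0).length
      rfl (by omega) (le_refl _) (by omega) (by omega)
    have hJ := J_Pidx target r 0
    rw [show target - 0 = target by ring] at hJ
    have hidx : bisectB (cumRev r 0) target 0 (cumRev r 0).length = Jfun r target :=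
      Pidx_unique _ _ _ _ hP hJ
    have hlen : (cumRev r 0).length = r.length := cumRev_length r 0
    have hk : (if bisectB (cumRev r 0) target 0 (cumRev r 0).length < (cumRev r 0).length
        then bisectB (cumRev r 0) target 0 (cumRev r 0).length + 1 else (cumRev r 0).length)
        = Kfun r target := by
      rw [hidx, hlen, K_eq_min]
      split_ifs with h <;> omega
    rw [hA, hk]
    have hklen : Kfun r target ≤ sentences.length := by
      have := Kfun_le_length r target
      simpa [hr] using this
    rw [take_reverse_eq_drop sentences (Kfun r target) hklen]
    simp
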